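-- pv_equiv track=rewrite | github.com/jueonkang/PS | 백준/Silver/24495. Non－Transitive Dice/Non－Transitive Dice.py | check
-- ===== SOURCE A (Python) =====
-- def beat(d1,d2):
--   count1 = 0
--   count2 = 0
--   for i in d1:
--     for j in d2:
--       if i>j:
--         count1 += 1
--       elif i<j:
--         count2 += 1
--   return count1 > count2
--
-- def check(A,B) :
--   for i in range(1,11):
--     for j in range(1,11):
--       for k in range(1,11):
--         for l in range(1,11):
--           C = [i,j,k,l]
--           if beat(B,C) and beat(C,A):
--             return True
--   return False
-- ===== SOURCE B (Python) =====
-- def check(A, B):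
--     # per face value v in 1..10: (win margin of B against v, win margin of v against A)
--     pairs = [(sum(1 for b in B if b > v) - sum(1 for b in B if b < v),
--               sum(1 for a in A if a < v) - sum(1 for a in A if a > v))
--              for v in range(1, 11)]
--     return any(f1 + f2 + f3 + f4 > 0 and g1 + g2 + g3 + g4 > 0
--                for f1, g1 in pairs
--                for f2, g2 in pairs
--                for f3, g3 in pairs
--                for f4, g4 in pairs)
-- ===== Notes on version B (the rewrite author's own statement) =====
-- stated objective: faster
-- what changed: B precomputes per-face-value win margins for B-vs-v and v-vs-A in one pass over each die, then tests sum positivity over the 10^4 candidate dice in O(1) each, eliminating A's O(n^2) beat() scan inside the quadruple loop.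
import Mathlib
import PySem

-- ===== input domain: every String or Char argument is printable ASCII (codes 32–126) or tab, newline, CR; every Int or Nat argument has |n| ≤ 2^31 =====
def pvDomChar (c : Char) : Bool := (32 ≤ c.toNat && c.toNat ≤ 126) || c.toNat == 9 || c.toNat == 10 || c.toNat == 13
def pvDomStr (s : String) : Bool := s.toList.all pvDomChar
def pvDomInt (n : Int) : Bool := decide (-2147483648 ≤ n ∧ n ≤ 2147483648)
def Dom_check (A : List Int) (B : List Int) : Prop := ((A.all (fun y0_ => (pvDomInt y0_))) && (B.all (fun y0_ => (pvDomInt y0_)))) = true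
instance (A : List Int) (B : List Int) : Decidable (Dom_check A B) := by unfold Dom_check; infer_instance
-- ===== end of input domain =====

-- B replaces A's per-candidate O(|A|·|B|-style) beat() scans by win-margin tables computed
-- once per die, testing each of the 10^4 candidate dice in O(1) (objective: faster).

-- ===== PORT A =====
def beat (d1 : List Int) (d2 : List Int) : Bool :=
  let p := d1.foldl (fun (acc : Int × Int) i =>
    d2.foldl (fun (acc : Int × Int) j =>
      if i > j then (acc.1 + 1, acc.2)
      else if i < j then (acc.1, acc.2 + 1)
      else acc) acc) (0, 0)
  decide (p.1 > p.2)

def check (A : List Int) (B : List Int) : Bool :=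
  (PySem.List.pyRange 1 11 1).any fun i =>
  (PySem.List.pyRange 1 11 1).any fun j =>
  (PySem.List.pyRange 1 11 1).any fun k =>
  (PySem.List.pyRange 1 11 1).any fun l =>
    beat B [i, j, k, l] && beat [i, j, k, l] A

-- ===== PORT B =====
-- the pair built for each face value v in Source B's comprehension
def marg (A : List Int) (B : List Int) (v : Int) : Int × Int :=
  (((B.filter (fun b => b > v)).length : Int) - ((B.filter (fun b => b < v)).length : Int),
   ((A.filter (fun a => a < v)).length : Int) - ((A.filter (fun a => a > v)).length : Int))

def check_alt (A : List Int) (B : List Int) : Bool :=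
  let pairs := (PySem.List.pyRange 1 11 1).map (marg A B)
  pairs.any fun p1 =>
  pairs.any fun p2 =>
  pairs.any fun p3 =>
  pairs.any fun p4 =>
    decide (p1.1 + p2.1 + p3.1 + p4.1 > 0) && decide (p1.2 + p2.2 + p3.2 + p4.2 > 0)

-- ===== PRECONDITION & SPEC =====
def Spec_check (A : List Int) (B : List Int) (out : Bool) : Prop := out = check_alt A B
instance (A : List Int) (B : List Int) (out : Bool) : Decidable (Spec_check A B out) := by unfold Spec_check; infer_instance

-- ===== CLAIM (what is proved, stated in full; the proofs are below) =====
def Claim_equal_check : Prop := ∀ (A : List Int) (B : List Int), Dom_check A B → Spec_check A B (check A B)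

-- ===== LEMMAS AND PROOFS =====

def cg (a c : Int) : Int := if a > c then 1 else 0
def cl (a c : Int) : Int := if a < c then 1 else 0

theorem inner_spec (a : Int) (cs : List Int) (acc : Int × Int) :
    cs.foldl (fun (acc : Int × Int) j =>
      if a > j then (acc.1 + 1, acc.2)
      else if a < j then (acc.1, acc.2 + 1)
      else acc) acc
    = (acc.1 + (cs.map (cg a)).sum, acc.2 + (cs.map (cl a)).sum) := by
  induction cs generalizing acc with
  | nil => simp
  | cons c cs ih =>
    rw [List.foldl_cons, ih]
    simp only [List.map_cons, List.sum_cons, cg, cl]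
    split_ifs <;> simp [Prod.ext_iff] <;> omega

theorem fold_pair (g h : Int → Int) (d : List Int) (acc : Int × Int) :
    d.foldl (fun (acc : Int × Int) a => (acc.1 + g a, acc.2 + h a)) acc
    = (acc.1 + (d.map g).sum, acc.2 + (d.map h).sum) := by
  induction d generalizing acc with
  | nil => simp
  | cons a d ih =>
    rw [List.foldl_cons, ih]
    simp only [List.map_cons, List.sum_cons, Prod.ext_iff]
    constructor <;> ring

theorem beat_fold (d1 cs : List Int) (acc : Int × Int) :
    d1.foldl (fun (acc : Int × Int) i =>
      cs.foldl (fun (acc : Int × Int) j =>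
        if i > j then (acc.1 + 1, acc.2)
        else if i < j then (acc.1, acc.2 + 1)
        else acc) acc) acc
    = (acc.1 + (d1.map (fun a => (cs.map (cg a)).sum)).sum,
       acc.2 + (d1.map (fun a => (cs.map (cl a)).sum)).sum) := by
  simp only [inner_spec]
  rw [fold_pair]

theorem beat_eq (d1 d2 : List Int) :
    beat d1 d2 = decide ((d1.map (fun a => (d2.map (cg a)).sum)).sum
                        > (d1.map (fun a => (d2.map (cl a)).sum)).sum) := by
  simp [beat, beat_fold]

theorem sum_map_add' (f g : Int → Int) (xs : List Int) :
    (xs.map (fun x => f x + g x)).sum = (xs.map f).sum + (xs.map g).sum := by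
  induction xs with
  | nil => simp
  | cons a xs ih => simp [ih]; ring

theorem sum_swap (f : Int → Int → Int) (xs ys : List Int) :
    (xs.map (fun a => (ys.map (f a)).sum)).sum
    = (ys.map (fun c => (xs.map (fun a => f a c)).sum)).sum := by
  induction xs with
  | nil => simp
  | cons a xs ih =>
    simp only [List.map_cons, List.sum_cons, ih]
    rw [← sum_map_add']

theorem sum_cg (d : List Int) (c : Int) :
    (d.map (fun a => cg a c)).sum = ((d.filter (fun a => a > c)).length : Int) := by
  induction d with
  | nil => simp
  | cons a d ih =>
    simp only [List.map_cons, List.sum_cons, List.filter_cons, ih]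
    by_cases h : a > c <;> simp [cg, h] <;> omega

theorem sum_cl (d : List Int) (c : Int) :
    (d.map (fun a => cl a c)).sum = ((d.filter (fun a => a < c)).length : Int) := by
  induction d with
  | nil => simp
  | cons a d ih =>
    simp only [List.map_cons, List.sum_cons, List.filter_cons, ih]
    by_cases h : a < c <;> simp [cl, h] <;> omega

theorem sum_cg_row (d : List Int) (c : Int) :
    (d.map (fun x => cg c x)).sum = ((d.filter (fun a => a < c)).length : Int) := by
  induction d with
  | nil => simp
  | cons a d ih =>
    simp only [List.map_cons, List.sum_cons, List.filter_cons, ih]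
    by_cases h : a < c <;> simp [cg, h, gt_iff_lt] <;> omega

theorem sum_cl_row (d : List Int) (c : Int) :
    (d.map (fun x => cl c x)).sum = ((d.filter (fun a => a > c)).length : Int) := by
  induction d with
  | nil => simp
  | cons a d ih =>
    simp only [List.map_cons, List.sum_cons, List.filter_cons, ih]
    by_cases h : a > c <;> simp [cl, h, gt_iff_lt] <;> omega

theorem point (A B : List Int) (i j k l : Int) :
    (beat B [i, j, k, l] && beat [i, j, k, l] A)
    = (decide ((marg A B i).1 + (marg A B j).1 + (marg A B k).1 + (marg A B l).1 > 0)
       && decide ((marg A B i).2 + (marg A B j).2 + (marg A B k).2 + (marg A B l).2 > 0)) := by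
  rw [beat_eq, beat_eq, sum_swap (f := cg), sum_swap (f := cl)]
  simp only [List.map_cons, List.map_nil, List.sum_cons, List.sum_nil,
    sum_cg, sum_cl, sum_cg_row, sum_cl_row, marg]
  congr 1 <;> rw [decide_eq_decide] <;> omega

-- ===== VERDICT (by name: the statement is the Claim_ definition above) =====
theorem check_spec : Claim_equal_check := by
  intro A B _
  unfold Spec_check check check_alt
  simp only [List.any_map, Function.comp_def, point]
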